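-- pv_equiv track=rewrite | github.com/vroomvroom314/Python-code-MiniProjects | Python Problems -SA/Week 9/lab9.py | powersOf3ToN
-- ===== SOURCE A (Python) =====
-- def powersOf3ToN(n, k =1):
--     if (n < 1):
--         return None
--     #gets rid negatives
--     elif (k > n):
--         return []
--     #base case to ensure that no more powers of three exist
--
--     else:
--         if (k <= n):
--             return [k] + powersOf3ToN(n, k*3)
-- ===== SOURCE B (Python) =====
-- def powersOf3ToN(n, k=1):
--     if n < 1:
--         return None
--     result = []
--     while k <= n:
--         result.append(k)
--         k *= 3
--     return result
-- ===== Notes on version B (the rewrite author's own statement) =====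
-- stated objective: simpler
-- what changed: Replaces the recursive prepend with an iterative while loop accumulating the powers into a list.
import Mathlib
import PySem

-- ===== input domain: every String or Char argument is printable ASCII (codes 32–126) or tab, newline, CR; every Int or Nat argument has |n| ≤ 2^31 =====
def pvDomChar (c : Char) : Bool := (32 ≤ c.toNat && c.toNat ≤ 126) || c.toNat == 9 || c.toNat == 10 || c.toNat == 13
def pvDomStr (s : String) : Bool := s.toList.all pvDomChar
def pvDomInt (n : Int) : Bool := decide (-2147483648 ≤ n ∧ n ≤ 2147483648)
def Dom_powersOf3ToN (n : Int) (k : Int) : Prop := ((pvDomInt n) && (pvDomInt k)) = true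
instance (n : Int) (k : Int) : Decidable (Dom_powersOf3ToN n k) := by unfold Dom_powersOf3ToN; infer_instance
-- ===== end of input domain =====

-- B replaces A's recursion with an iterative accumulation loop (same values, same order); not claimed faster.


-- ===== PORT A =====
-- Literal transliteration of A's recursion. For n ≥ 1 and k ≤ 0 the Python recursion
-- never terminates (RecursionError); those inputs are excluded by Pre_, and the
-- totality guard `k ≤ 0 → none` below only makes the recursion well-founded there.
def powersOf3ToN (n : Int) (k : Int) : Option (List Int) :=
  if h1 : n < 1 then none
  else if h2 : k > n then some []
  else if h3 : k ≤ 0 then none  -- totality guard; Python diverges here (outside Pre_)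
  else (powersOf3ToN n (k * 3)).map (fun l => k :: l)
termination_by (n + 1 - k).toNat
decreasing_by omega

-- ===== PORT B =====
-- B's while loop: `while k <= n: result.append(k); k *= 3`. Same totality guard
-- 1 ≤ k (the Python loop also diverges for n ≥ 1, k ≤ 0, outside Pre_).
def powersOf3ToN_altGo (n : Int) (k : Int) (result : List Int) : List Int :=
  if _h : k ≤ n ∧ 1 ≤ k then powersOf3ToN_altGo n (k * 3) (result ++ [k]) else result
termination_by (n + 1 - k).toNat
decreasing_by omega

def powersOf3ToN_alt (n : Int) (k : Int) : Option (List Int) :=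
  if n < 1 then none
  else some (powersOf3ToN_altGo n k [])

-- ===== PRECONDITION & SPEC =====
-- Pre_ excludes n ≥ 1 with k ≤ 0, where Python A (and B) recurse/loop forever (RecursionError).
def Pre_powersOf3ToN (n : Int) (k : Int) : Prop := n < 1 ∨ 1 ≤ k
instance (n : Int) (k : Int) : Decidable (Pre_powersOf3ToN n k) := by unfold Pre_powersOf3ToN; infer_instance
def pvWitness_powersOf3ToN : Int × Int := (40, 1)

def Spec_powersOf3ToN (n : Int) (k : Int) (out : Option (List Int)) : Prop := out = powersOf3ToN_alt n k
instance (n : Int) (k : Int) (out : Option (List Int)) : Decidable (Spec_powersOf3ToN n k out) := by unfold Spec_powersOf3ToN; infer_instance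

-- ===== CLAIM (what is proved, stated in full; the proofs are below) =====
def Claim_equal_powersOf3ToN : Prop := ∀ (n : Int) (k : Int), Dom_powersOf3ToN n k → Pre_powersOf3ToN n k → Spec_powersOf3ToN n k (powersOf3ToN n k)

-- ===== LEMMAS AND PROOFS =====
lemma powersOf3ToN_key (n : Int) (hn : 1 ≤ n) :
    ∀ m : Nat, ∀ k : Int, 1 ≤ k → (n + 1 - k).toNat = m →
      ∃ L, powersOf3ToN n k = some L ∧ ∀ acc, powersOf3ToN_altGo n k acc = acc ++ L := by
  intro m
  induction m using Nat.strong_induction_on with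
  | _ m ih =>
    intro k hk hm
    by_cases hkn : k > n
    · refine ⟨[], ?_, ?_⟩
      · rw [powersOf3ToN.eq_def]; simp [hkn]; omega
      · intro acc; rw [powersOf3ToN_altGo.eq_def]; simp; omega
    · obtain ⟨L, hA, hB⟩ := ih (n + 1 - k * 3).toNat (by omega) (k * 3) (by omega) rfl
      refine ⟨k :: L, ?_, ?_⟩
      · rw [powersOf3ToN.eq_def, hA]
        have h1 : ¬ n < 1 := by omega
        have h2 : ¬ k ≤ 0 := by omega
        simp [hkn, h1, h2]
      · intro acc
        rw [powersOf3ToN_altGo.eq_def]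
        have : k ≤ n ∧ 1 ≤ k := ⟨by omega, hk⟩
        simp [this, hB]

-- ===== VERDICT (by name: the statement is the Claim_ definition above) =====
theorem powersOf3ToN_spec : Claim_equal_powersOf3ToN := by
  intro n k _ hpre
  unfold Spec_powersOf3ToN powersOf3ToN_alt
  by_cases hn : n < 1
  · rw [powersOf3ToN.eq_def]; simp [hn]
  · rcases hpre with h | hk
    · omega
    · obtain ⟨L, hA, hB⟩ := powersOf3ToN_key n (by omega) (n + 1 - k).toNat k hk rfl
      simp [hn, hA, hB []]
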